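-- pv_equiv track=rewrite | github.com/Kawser-nerd/CLCDSA | Source Codes/AtCoder/arc006/C/4492956.py | bump
-- ===== SOURCE A (Python) =====
-- import bisect
--
-- def bump(T, x):
--     if T == []:
--         return [[x]]
--     else:
--         i = bisect.bisect_right(T[0], x)
--         if i == len(T[0]):
--             return [T[0] + [x]] + T[1:]
--         else:
--             y = T[0][i]
--             T[0][i] = x
--             return [T[0]] + bump(T[1:], y)
-- ===== SOURCE B (Python) =====
-- import bisect
--
-- def bump(T, x):
--     out = []
--     for k, row in enumerate(T):
--         i = bisect.bisect_right(row, x)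
--         if i == len(row):
--             out.append(row + [x])
--             out.extend(T[k + 1:])
--             return out
--         x, row[i] = row[i], x
--         out.append(row)
--     out.append([x])
--     return out
-- ===== Notes on version B (the rewrite author's own statement) =====
-- stated objective: alternative
-- what changed: Replaces A's recursion, which copies the tail T[1:] and concatenates singleton lists at every level, with a single forward loop that appends each settled row to an output accumulator and copies the remaining rows only once on early exit.
import Mathlib
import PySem

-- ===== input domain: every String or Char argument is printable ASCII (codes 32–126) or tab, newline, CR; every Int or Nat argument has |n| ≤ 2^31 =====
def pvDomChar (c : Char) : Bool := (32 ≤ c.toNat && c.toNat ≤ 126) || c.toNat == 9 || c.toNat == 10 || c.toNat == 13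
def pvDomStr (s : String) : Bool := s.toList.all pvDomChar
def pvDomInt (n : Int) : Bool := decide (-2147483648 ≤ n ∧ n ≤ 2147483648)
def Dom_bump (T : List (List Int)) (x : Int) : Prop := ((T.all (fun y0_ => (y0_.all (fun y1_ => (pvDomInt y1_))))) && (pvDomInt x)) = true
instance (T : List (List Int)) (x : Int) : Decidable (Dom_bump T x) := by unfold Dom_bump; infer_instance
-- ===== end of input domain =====

-- B replaces A's recursion (tail copy + concatenation per level) with one forward loop and an
-- output accumulator; the equivalence proved is about the RETURN value (both Pythons also mutate
-- the input rows identically in place).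

-- Shared library call: bisect.bisect_right(a, x), transcribed step for step
-- (lo = 0, hi = len(a); while lo < hi: mid = (lo+hi)//2; ...). Nat '/' on the
-- non-negative mid equals Python's '//'; a[mid] is always in range (mid < hi ≤ len a),
-- so the getD 0 default is never taken.
def bisectRight (a : List Int) (x : Int) (lo hi : Nat) : Nat :=
  if lo < hi then
    let mid := (lo + hi) / 2
    if x < (a[mid]?.getD 0) then bisectRight a x lo mid
    else bisectRight a x (mid + 1) hi
  else lo
termination_by hi - lo
decreasing_by all_goals omega

-- ===== PORT A =====
-- A recursively: if i == len(T[0]) append x to the first pile and keep the (copied) tail,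
-- else swap x into T[0][i] (T[0][i] always in range, so the getD 0 for y is never taken)
-- and recurse on T[1:] with the displaced value, re-prepending the head.
def bump (T : List (List Int)) (x : Int) : List (List Int) :=
  match T with
  | [] => [[x]]
  | r :: rest =>
    let i := bisectRight r x 0 r.length
    if i = r.length then (r ++ [x]) :: rest
    else
      let y := (r[i]?.getD 0)
      (r.set i x) :: bump rest y

-- ===== PORT B =====
-- B's loop over the rows, carrying the output accumulator `out` and the value still to place;
-- on early exit it appends row+[x] and the untouched remaining rows once.
def bumpLoop (rows : List (List Int)) (x : Int) (out : List (List Int)) : List (List Int) :=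
  match rows with
  | [] => out ++ [[x]]
  | row :: rest =>
    let i := bisectRight row x 0 row.length
    if i = row.length then out ++ ((row ++ [x]) :: rest)
    else bumpLoop rest (row[i]?.getD 0) (out ++ [row.set i x])

def bump_alt (T : List (List Int)) (x : Int) : List (List Int) :=
  bumpLoop T x []

-- ===== PRECONDITION & SPEC =====
def Spec_bump (T : List (List Int)) (x : Int) (out : List (List Int)) : Prop := out = bump_alt T x
instance (T : List (List Int)) (x : Int) (out : List (List Int)) : Decidable (Spec_bump T x out) := by unfold Spec_bump; infer_instance

-- ===== CLAIM (what is proved, stated in full; the proofs are below) =====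
def Claim_equal_bump : Prop := ∀ (T : List (List Int)) (x : Int), Dom_bump T x → Spec_bump T x (bump T x)

-- ===== LEMMAS AND PROOFS =====
-- Loop invariant: B's accumulator loop computes `out ++` A's recursive result.
theorem bumpLoop_eq (rows : List (List Int)) (x : Int) (out : List (List Int)) :
    bumpLoop rows x out = out ++ bump rows x := by
  induction rows generalizing x out with
  | nil => simp [bumpLoop, bump]
  | cons row rest ih =>
    simp only [bumpLoop, bump]
    split
    · rfl
    · rw [ih]; simp

-- ===== VERDICT (by name: the statement is the Claim_ definition above) =====
theorem bump_spec : Claim_equal_bump := by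
  intro T x _
  unfold Spec_bump bump_alt
  rw [bumpLoop_eq]
  simp
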